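-- pv_equiv track=rewrite | github.com/pypi-data/pypi-mirror-204 | packages/joulescope-ui/joulescope_ui-1.0.9.tar.gz/joulescope_ui-1.0.9/joulescope_ui/widgets/waveform/waveform_widget.py | _target_from_list
-- ===== SOURCE A (Python) =====
-- def _target_from_list(targets):
--     d = {}
--     v = 0
--     for sz, n in targets:
--         v_next = v + sz
--         if n in d:
--             raise RuntimeError(f'Duplicate section name {n}')
--         d[n] = [sz, v, v_next]
--         v = v_next
--     return d
-- ===== SOURCE B (Python) =====
-- def _target_from_list(targets):
--     targets = list(targets)
--     ends = []
--     t = 0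
--     for sz, _ in targets:
--         t += sz
--         ends.append(t)
--     starts = [0] + ends[:-1]
--     d = {}
--     for (sz, n), (s, e) in zip(targets, zip(starts, ends)):
--         if n in d:
--             raise RuntimeError(f'Duplicate section name {n}')
--         d[n] = [sz, s, e]
--     return d
-- ===== Notes on version B (the rewrite author's own statement) =====
-- stated objective: alternative
-- what changed: Instead of threading a running offset through one dict-building loop, B first computes the cumulative end offsets in a separate pass, derives the start offsets as [0]+ends[:-1], and then assembles the dict in a second pass over the zipped triples.
import Mathlib
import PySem

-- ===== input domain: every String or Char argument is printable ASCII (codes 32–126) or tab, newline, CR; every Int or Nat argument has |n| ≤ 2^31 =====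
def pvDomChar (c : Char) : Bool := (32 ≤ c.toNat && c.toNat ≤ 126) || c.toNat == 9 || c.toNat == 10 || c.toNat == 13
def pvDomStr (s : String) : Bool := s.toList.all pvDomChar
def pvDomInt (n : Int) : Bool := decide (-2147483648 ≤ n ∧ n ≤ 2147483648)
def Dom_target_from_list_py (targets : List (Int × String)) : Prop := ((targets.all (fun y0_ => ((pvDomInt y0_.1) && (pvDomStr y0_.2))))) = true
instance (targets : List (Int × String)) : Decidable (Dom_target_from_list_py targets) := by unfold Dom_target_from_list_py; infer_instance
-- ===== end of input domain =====

-- B separates the cumulative-offset computation (one pass building `ends`, starts = [0]+ends[:-1])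
-- from the dict assembly (a second pass over the zipped triples); A threads a running offset
-- through a single dict-building loop. Alternative decomposition, same O(n) cost; return values only.

-- ===== PORT A =====
-- one loop: dict d and running offset v; the duplicate-name raise is excluded by Pre_
def target_from_list_py (targets : List (Int × String)) : List (String × List Int) :=
  (targets.foldl
    (fun (st : PySem.Dict String (List Int) × Int) p =>
      let v_next := st.2 + p.1
      (st.1.insert p.2 [p.1, st.2, v_next], v_next))
    (PySem.Dict.empty, 0)).1.items

-- ===== PORT B =====
-- pass 1: cumulative end offsets; starts = 0 :: ends.dropLast; pass 2: build the dict from the zip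
def target_from_list_py_alt (targets : List (Int × String)) : List (String × List Int) :=
  let ends := (targets.foldl
    (fun (acc : List Int × Int) p => (acc.1 ++ [acc.2 + p.1], acc.2 + p.1)) ([], 0)).1
  let starts := 0 :: ends.dropLast
  ((targets.zip (starts.zip ends)).foldl
    (fun (d : PySem.Dict String (List Int)) q => d.insert q.1.2 [q.1.1, q.2.1, q.2.2])
    PySem.Dict.empty).items

-- ===== PRECONDITION & SPEC =====
-- Pre_ excludes lists with a duplicate section name: there A (and B) raise RuntimeError instead of returning.
def Pre_target_from_list_py (targets : List (Int × String)) : Prop :=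
  (targets.map Prod.snd).Nodup
instance (targets : List (Int × String)) : Decidable (Pre_target_from_list_py targets) := by
  unfold Pre_target_from_list_py; infer_instance

def pvWitness_target_from_list_py : (List (Int × String)) := [(3, "a"), (2, "b"), (-1, "c")]

def Spec_target_from_list_py (targets : List (Int × String)) (out : List (String × List Int)) : Prop := out = target_from_list_py_alt targets
instance (targets : List (Int × String)) (out : List (String × List Int)) : Decidable (Spec_target_from_list_py targets out) := by unfold Spec_target_from_list_py; infer_instance

-- ===== CLAIM (what is proved, stated in full; the proofs are below) =====
def Claim_equal_target_from_list_py : Prop := ∀ (targets : List (Int × String)), Dom_target_from_list_py targets → Pre_target_from_list_py targets → Spec_target_from_list_py targets (target_from_list_py targets)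

-- ===== LEMMAS AND PROOFS =====

-- the common closed form: the association list both programs build, offsets starting at v
def pvBuild (v : Int) : List (Int × String) → List (String × List Int)
  | [] => []
  | p :: rest => (p.2, [p.1, v, v + p.1]) :: pvBuild (v + p.1) rest

-- the list of cumulative end offsets starting from t
def pvEnds (t : Int) : List (Int × String) → List Int
  | [] => []
  | p :: rest => (t + p.1) :: pvEnds (t + p.1) rest

theorem pvEnds_length (t : Int) (l : List (Int × String)) : (pvEnds t l).length = l.length := by
  induction l generalizing t with
  | nil => rfl
  | cons p rest ih => simp [pvEnds, ih]

-- A's loop, generalized over the accumulated dict and offset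
theorem pvA_foldl (targets : List (Int × String)) (d : PySem.Dict String (List Int)) (v : Int)
    (hnd : (targets.map Prod.snd).Nodup)
    (hfresh : ∀ p ∈ targets, d.contains p.2 = false) :
    (targets.foldl
      (fun (st : PySem.Dict String (List Int) × Int) p =>
        let v_next := st.2 + p.1
        (st.1.insert p.2 [p.1, st.2, v_next], v_next)) (d, v)).1.items
      = d.items ++ pvBuild v targets := by
  induction targets generalizing d v with
  | nil => simp [pvBuild]
  | cons p rest ih =>
    simp only [List.foldl_cons, List.map_cons, List.nodup_cons] at hnd ⊢
    have hp : d.contains p.2 = false := hfresh p (by simp)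
    rw [ih (d.insert p.2 [p.1, v, v + p.1]) (v + p.1) hnd.2]
    · rw [PySem.Dict.items_insert_of_not_contains _ _ hp]
      simp [pvBuild]
    · intro q hq
      rw [PySem.Dict.contains_insert]
      have hqn : q.2 ≠ p.2 := by
        intro h
        exact hnd.1 (h ▸ List.mem_map_of_mem hq)
      simp [hqn, hfresh q (List.mem_cons_of_mem _ hq)]

-- B's first pass computes pvEnds
theorem pvB_ends (targets : List (Int × String)) (l : List Int) (t : Int) :
    (targets.foldl
      (fun (acc : List Int × Int) p => (acc.1 ++ [acc.2 + p.1], acc.2 + p.1)) (l, t)).1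
      = l ++ pvEnds t targets := by
  induction targets generalizing l t with
  | nil => simp [pvEnds]
  | cons p rest ih => simp [pvEnds, ih]

-- zipping targets with (starts, ends) and shaping the triples yields pvBuild
theorem pvB_zip (targets : List (Int × String)) (v : Int) :
    (targets.zip ((v :: (pvEnds v targets).dropLast).zip (pvEnds v targets))).map
      (fun q => (q.1.2, [q.1.1, q.2.1, q.2.2]))
      = pvBuild v targets := by
  induction targets generalizing v with
  | nil => simp [pvEnds, pvBuild]
  | cons p rest ih =>
    cases rest with
    | nil => simp [pvEnds, pvBuild]
    | cons q rest' =>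
      have h : (pvEnds v (p :: q :: rest')).dropLast
          = (v + p.1) :: (pvEnds (v + p.1) (q :: rest')).dropLast := by
        simp only [pvEnds]
        rw [List.dropLast_cons_of_ne_nil]
        simp
      rw [h]
      simp only [pvEnds, List.zip_cons_cons, List.map_cons, pvBuild]
      exact congrArg _ (ih (v + p.1))

-- B's port (with Pre_) equals the common closed form
theorem pvB_eq (targets : List (Int × String)) (hpre : (targets.map Prod.snd).Nodup) :
    target_from_list_py_alt targets = pvBuild 0 targets := by
  unfold target_from_list_py_alt
  simp only [pvB_ends, List.nil_append]
  have hlen : ((0 :: (pvEnds 0 targets).dropLast).zip (pvEnds 0 targets)).length = targets.length := by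
    by_cases h : targets = []
    · simp [h, pvEnds]
    · have h1 := pvEnds_length 0 targets
      have h2 : (pvEnds 0 targets) ≠ [] := by
        intro hc; apply h
        have := pvEnds_length 0 targets
        rw [hc] at this
        exact List.eq_nil_of_length_eq_zero this.symm
      simp [List.length_zip, h1, List.length_dropLast]
      omega
  have hnames : (targets.zip ((0 :: (pvEnds 0 targets).dropLast).zip (pvEnds 0 targets))).map (fun q => q.1.2)
      = targets.map Prod.snd := by
    have hfst := List.map_fst_zip (l₁ := targets)
      (l₂ := (0 :: (pvEnds 0 targets).dropLast).zip (pvEnds 0 targets)) (by omega)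
    rw [show (fun (q : (Int × String) × (Int × Int)) => q.1.2) = Prod.snd ∘ Prod.fst from rfl,
      ← List.map_map, hfst]
  have hfi := PySem.Dict.items_foldl_insert_fresh
    (targets.zip ((0 :: (pvEnds 0 targets).dropLast).zip (pvEnds 0 targets)))
    (fun q => q.1.2) (fun q => [q.1.1, q.2.1, q.2.2]) PySem.Dict.empty
    (by intro a _; simp [PySem.Dict.contains_empty]) (by rw [hnames]; exact hpre)
  simp only at hfi
  rw [hfi, pvB_zip targets 0]
  simp [PySem.Dict.empty]

-- ===== VERDICT (by name: the statement is the Claim_ definition above) =====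
theorem target_from_list_py_spec : Claim_equal_target_from_list_py := by
  intro targets _ hpre
  unfold Spec_target_from_list_py target_from_list_py
  rw [pvA_foldl targets PySem.Dict.empty 0 hpre (by simp [PySem.Dict.contains_empty]),
    pvB_eq targets hpre]
  simp [PySem.Dict.empty]
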